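-- pv_equiv track=rewrite | github.com/saadtariq38/Pyaint-Open-Source-Project-Contribution | main.py | get_dotted_heart_coordinates
-- ===== SOURCE A (Python) =====
-- def get_dotted_heart_coordinates(X,Y):
--     list = []
--     for i in range(3):
--         #list.append((X - i, Y - i))
--         list.append((X - i, Y + i))
--
--     for i in range(3):
--         list.append((X - 3, Y + 3 + i))
--
--     for i in range(2):
--         list.append((X - 2 + i, Y + 6 + i))
--
--     for i in range(2):
--         list.append((X + i, Y + 7))
--
--     for i in range(7):
--         list.append((X + 2 + i, Y + 6 - i))
--
--     for i in range(1,7):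
--         list.append((X + 8 - i, Y - i))
--
--     for i in range(2):
--         list.append((X + 1 - i, Y - 7))
--
--     for i in range(2):
--         list.append((X - 1 - i, Y - 7 + i))
--
--     for i in range(3):
--         list.append((X - 3, Y - 5 + i))
--
--     for i in range(2):
--         list.append((X - 2 + i, Y - 2 + i))
--
--
--
--
--     return list
-- ===== SOURCE B (Python) =====
-- OFFSETS = [
--     (0, 0), (-1, 1), (-2, 2),
--     (-3, 3), (-3, 4), (-3, 5),
--     (-2, 6), (-1, 7),
--     (0, 7), (1, 7),
--     (2, 6), (3, 5), (4, 4), (5, 3), (6, 2), (7, 1), (8, 0),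
--     (7, -1), (6, -2), (5, -3), (4, -4), (3, -5), (2, -6),
--     (1, -7), (0, -7),
--     (-1, -7), (-2, -6),
--     (-3, -5), (-3, -4), (-3, -3),
--     (-2, -2), (-1, -1),
-- ]
--
-- def get_dotted_heart_coordinates(X, Y):
--     return [(X + dx, Y + dy) for dx, dy in OFFSETS]
-- ===== Notes on version B (the rewrite author's own statement) =====
-- stated objective: simpler
-- what changed: Replaced ten separate arithmetic loops with a single literal (dx, dy) offset table and one uniform translation pass.
import Mathlib
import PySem

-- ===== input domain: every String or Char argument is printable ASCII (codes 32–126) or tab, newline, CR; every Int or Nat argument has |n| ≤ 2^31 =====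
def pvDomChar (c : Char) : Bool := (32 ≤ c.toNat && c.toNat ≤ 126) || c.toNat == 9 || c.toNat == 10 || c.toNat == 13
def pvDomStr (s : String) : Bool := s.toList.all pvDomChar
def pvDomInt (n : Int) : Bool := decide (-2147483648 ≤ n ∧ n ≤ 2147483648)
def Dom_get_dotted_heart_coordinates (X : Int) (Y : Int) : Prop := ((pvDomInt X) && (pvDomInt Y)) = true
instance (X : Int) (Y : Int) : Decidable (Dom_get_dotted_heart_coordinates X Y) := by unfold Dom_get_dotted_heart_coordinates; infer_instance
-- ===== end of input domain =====

-- B replaces A's ten arithmetic loops by one literal offset table and a single translation pass (simpler).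

-- ===== PORT A =====
-- Literal transliteration: each 'for i in range(...)' loop is a foldl over PySem.List.pyRange appending to the accumulator.
def get_dotted_heart_coordinates (X : Int) (Y : Int) : List (Int × Int) :=
  let l : List (Int × Int) := []
  let l := (PySem.List.pyRange 0 3 1).foldl (fun acc i => acc ++ [(X - i, Y + i)]) l
  let l := (PySem.List.pyRange 0 3 1).foldl (fun acc i => acc ++ [(X - 3, Y + 3 + i)]) l
  let l := (PySem.List.pyRange 0 2 1).foldl (fun acc i => acc ++ [(X - 2 + i, Y + 6 + i)]) l
  let l := (PySem.List.pyRange 0 2 1).foldl (fun acc i => acc ++ [(X + i, Y + 7)]) l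
  let l := (PySem.List.pyRange 0 7 1).foldl (fun acc i => acc ++ [(X + 2 + i, Y + 6 - i)]) l
  let l := (PySem.List.pyRange 1 7 1).foldl (fun acc i => acc ++ [(X + 8 - i, Y - i)]) l
  let l := (PySem.List.pyRange 0 2 1).foldl (fun acc i => acc ++ [(X + 1 - i, Y - 7)]) l
  let l := (PySem.List.pyRange 0 2 1).foldl (fun acc i => acc ++ [(X - 1 - i, Y - 7 + i)]) l
  let l := (PySem.List.pyRange 0 3 1).foldl (fun acc i => acc ++ [(X - 3, Y - 5 + i)]) l
  let l := (PySem.List.pyRange 0 2 1).foldl (fun acc i => acc ++ [(X - 2 + i, Y - 2 + i)]) l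
  l

-- ===== PORT B =====
def heartOffsets : List (Int × Int) :=
  [(0, 0), (-1, 1), (-2, 2),
   (-3, 3), (-3, 4), (-3, 5),
   (-2, 6), (-1, 7),
   (0, 7), (1, 7),
   (2, 6), (3, 5), (4, 4), (5, 3), (6, 2), (7, 1), (8, 0),
   (7, -1), (6, -2), (5, -3), (4, -4), (3, -5), (2, -6),
   (1, -7), (0, -7),
   (-1, -7), (-2, -6),
   (-3, -5), (-3, -4), (-3, -3),
   (-2, -2), (-1, -1)]

def get_dotted_heart_coordinates_alt (X : Int) (Y : Int) : List (Int × Int) :=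
  heartOffsets.map (fun p => (X + p.1, Y + p.2))

-- ===== PRECONDITION & SPEC =====
def Spec_get_dotted_heart_coordinates (X : Int) (Y : Int) (out : List (Int × Int)) : Prop := out = get_dotted_heart_coordinates_alt X Y
instance (X : Int) (Y : Int) (out : List (Int × Int)) : Decidable (Spec_get_dotted_heart_coordinates X Y out) := by unfold Spec_get_dotted_heart_coordinates; infer_instance

-- ===== CLAIM (what is proved, stated in full; the proofs are below) =====
def Claim_equal_get_dotted_heart_coordinates : Prop := ∀ (X : Int) (Y : Int), Dom_get_dotted_heart_coordinates X Y → Spec_get_dotted_heart_coordinates X Y (get_dotted_heart_coordinates X Y)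

-- ===== LEMMAS AND PROOFS =====

-- ===== VERDICT (by name: the statement is the Claim_ definition above) =====
theorem get_dotted_heart_coordinates_spec : Claim_equal_get_dotted_heart_coordinates := by
  intro X Y _
  unfold Spec_get_dotted_heart_coordinates get_dotted_heart_coordinates get_dotted_heart_coordinates_alt heartOffsets
  simp [PySem.List.pyRange_one, List.range_succ]
  omega
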